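-- pv_equiv track=rewrite | github.com/Jefferson-F-Ribeiro/quickprojects | python/cifrador/cifrador_monoalfabetico.py | criar_tabela_substituicao
-- ===== SOURCE A (Python) =====
-- def criar_tabela_substituicao(chave):
--     alfabeto = "ABCDEFGHIJKLMNOPQRSTUVWXYZ"
--     tabela_substituicao = {}
--
--     chave = chave.upper()
--     chave = ''.join(sorted(set(chave), key=chave.index))  # Remove letras duplicadas e mantém a ordem
--
--     for i in range(len(alfabeto)):
--         if i < len(chave):
--             tabela_substituicao[alfabeto[i]] = chave[i]
--         else:
--             letras_nao_utilizadas = [letra for letra in alfabeto if letra not in tabela_substituicao.values()]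
--             tabela_substituicao[alfabeto[i]] = letras_nao_utilizadas[0]
--
--     return tabela_substituicao
-- ===== SOURCE B (Python) =====
-- def criar_tabela_substituicao(chave):
--     alfabeto = "ABCDEFGHIJKLMNOPQRSTUVWXYZ"
--     chave = ''.join(dict.fromkeys(chave.upper()))
--     valores = chave + ''.join(c for c in alfabeto if c not in chave)
--     return dict(zip(alfabeto, valores))
-- ===== Notes on version B (the rewrite author's own statement) =====
-- stated objective: simpler
-- what changed: B dedups the upper-cased key once, builds the full value sequence up front as dedup'd key + the alphabet letters not in it, and zips it with the alphabet, removing A's per-iteration rescan of the dict's values.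
import Mathlib
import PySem

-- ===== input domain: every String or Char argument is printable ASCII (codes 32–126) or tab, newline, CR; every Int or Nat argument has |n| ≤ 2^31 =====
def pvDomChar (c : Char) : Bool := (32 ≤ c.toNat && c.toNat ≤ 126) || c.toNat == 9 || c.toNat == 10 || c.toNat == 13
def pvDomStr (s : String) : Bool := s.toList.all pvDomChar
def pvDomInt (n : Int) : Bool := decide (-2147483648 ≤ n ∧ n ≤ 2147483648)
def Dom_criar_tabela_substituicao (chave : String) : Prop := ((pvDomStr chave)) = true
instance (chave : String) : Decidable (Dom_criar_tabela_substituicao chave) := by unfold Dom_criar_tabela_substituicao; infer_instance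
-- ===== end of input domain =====

-- B replaces A's per-iteration rescan of the already-used values by computing the whole
-- value sequence (dedup'd key ++ unused letters) once up front; objective: simpler.

-- ===== PORT A =====
-- Strings are handled at the List Char level (1-char Python strings become `String.ofList [c]`
-- exactly where the Python dict stores strings); `letras_nao_utilizadas[0]` is ported with
-- PySem.List.pyGetD, whose default is unreachable (the filtered list is never empty there).
def criar_tabela_substituicao (chave : String) : List (String × String) :=
  let alfabeto : List Char := "ABCDEFGHIJKLMNOPQRSTUVWXYZ".toList
  let chaveU : List Char := PySem.Chars.upper chave.toList
  -- sorted(set(chave), key=chave.index): the key is injective on the set's elements,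
  -- so the result does not depend on the set's iteration order
  let chave2 : List Char :=
    PySem.List.sorted (PySem.Set.ofList chaveU) (fun c => PySem.Chars.find chaveU [c])
  let tabela : PySem.Dict String String :=
    (PySem.List.pyRange 0 (alfabeto.length : Int) 1).foldl
      (fun t i =>
        if i < (chave2.length : Int) then
          t.insert (String.ofList [PySem.List.pyGetD alfabeto i ' '])
            (String.ofList [PySem.List.pyGetD chave2 i ' '])
        else
          let letras_nao_utilizadas : List Char :=
            alfabeto.filter (fun letra => !(t.values.contains (String.ofList [letra])))
          t.insert (String.ofList [PySem.List.pyGetD alfabeto i ' '])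
            (String.ofList [PySem.List.pyGetD letras_nao_utilizadas 0 ' ']))
      PySem.Dict.empty
  tabela.items

-- ===== PORT B =====
def criar_tabela_substituicao_alt (chave : String) : List (String × String) :=
  let alfabeto : List Char := "ABCDEFGHIJKLMNOPQRSTUVWXYZ".toList
  let chave2 : List Char := PySem.List.dedup (PySem.Chars.upper chave.toList)
  let valores : List Char := chave2 ++ alfabeto.filter (fun c => !(chave2.contains c))
  (PySem.Dict.ofList
    ((alfabeto.map (fun c => String.ofList [c])).zip (valores.map (fun c => String.ofList [c])))).items

-- ===== PRECONDITION & SPEC =====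
def Spec_criar_tabela_substituicao (chave : String) (out : List (String × String)) : Prop := out = criar_tabela_substituicao_alt chave
instance (chave : String) (out : List (String × String)) : Decidable (Spec_criar_tabela_substituicao chave out) := by unfold Spec_criar_tabela_substituicao; infer_instance

-- ===== CLAIM (what is proved, stated in full; the proofs are below) =====
def Claim_equal_criar_tabela_substituicao : Prop := ∀ (chave : String), Dom_criar_tabela_substituicao chave → Spec_criar_tabela_substituicao chave (criar_tabela_substituicao chave)

-- ===== LEMMAS AND PROOFS =====

-- proof-only abbreviations (the alphabet literal, 1-char strings, B's value sequence, A's loop step)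
def pvA26 : List Char := "ABCDEFGHIJKLMNOPQRSTUVWXYZ".toList
def pvS (c : Char) : String := String.ofList [c]
def pvVal (k : List Char) : List Char := k ++ pvA26.filter (fun c => !(k.contains c))
def pvStep (k : List Char) (t : PySem.Dict String String) (i : Int) : PySem.Dict String String :=
  if i < (k.length : Int) then
    t.insert (pvS (PySem.List.pyGetD pvA26 i ' ')) (pvS (PySem.List.pyGetD k i ' '))
  else
    t.insert (pvS (PySem.List.pyGetD pvA26 i ' '))
      (pvS (PySem.List.pyGetD
        (pvA26.filter (fun letra => !(t.values.contains (pvS letra)))) 0 ' '))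

theorem pvS_inj : Function.Injective pvS := by
  intro a b h
  simpa [pvS] using congrArg String.toList h

theorem contains_map_pvS (xs : List Char) (c : Char) :
    ((xs.map pvS).contains (pvS c)) = xs.contains c := by
  simp [List.contains_eq_mem, List.mem_map, pvS_inj.eq_iff]

-- chave.index of a character occurring in u is its first-occurrence index
theorem find_singleton (u : List Char) (c : Char) (h : c ∈ u) :
    PySem.Chars.find u [c] = (u.idxOf c : Int) := by
  have hinf : [c] <:+: u := by
    obtain ⟨s, t, rfl⟩ := List.append_of_mem h
    exact ⟨s, t, by simp⟩
  have h0 : 0 ≤ PySem.Chars.find u [c] := (PySem.Chars.find_nonneg_iff u [c]).2 hinf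
  obtain ⟨hpre, hmin⟩ := PySem.Chars.find_spec h0
  set f : Nat := (PySem.Chars.find u [c]).toNat with hf
  obtain ⟨t, ht⟩ := hpre
  have hflen : f < u.length := by
    have := congrArg List.length ht
    simp at this
    omega
  have huf : u[f] = c := by
    have h2 : (u.drop f)[0]'(by simp; omega) = c := by
      simp [← ht]
    simpa [List.getElem_drop] using h2
  have hidx : u.idxOf c < u.length := List.idxOf_lt_length_of_mem h
  have h1 : u.idxOf c ≤ f := by
    have hmem : c ∈ u.take (f + 1) := by
      rw [List.take_add_one]
      simp [List.getElem?_eq_getElem hflen, huf]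
    have := (List.mem_take_iff_idxOf_lt h).1 hmem
    omega
  have h2 : f ≤ u.idxOf c := by
    by_contra hc
    apply hmin (u.idxOf c) (by omega)
    refine ⟨u.drop (u.idxOf c + 1), ?_⟩
    have := List.getElem_cons_drop hidx
    rw [List.getElem_idxOf hidx] at this
    simpa using this
  have : f = u.idxOf c := le_antisymm h2 h1
  omega

-- set(u) in first-insertion order is strictly increasing in first-occurrence index
theorem ofList_pairwise_idxOf (u : List Char) :
    (PySem.Set.ofList u).Pairwise (fun a b => u.idxOf a < u.idxOf b) := by
  induction u using List.reverseRecOn with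
  | nil => simp [PySem.Set.ofList]
  | append_singleton u x ih =>
    have hof : PySem.Set.ofList (u ++ [x]) = PySem.Set.add (PySem.Set.ofList u) x := by
      simp [PySem.Set.ofList_eq_foldl, List.foldl_append]
    by_cases hx : x ∈ u
    · have hadd : PySem.Set.add (PySem.Set.ofList u) x = PySem.Set.ofList u := by
        simp [PySem.Set.add, PySem.Set.contains, List.contains_eq_mem,
          (PySem.Set.mem_ofList u x).2 hx]
      rw [hof, hadd]
      refine ih.imp_of_mem ?_
      intro a b ha hb hab
      have ha' : a ∈ u := (PySem.Set.mem_ofList u a).1 ha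
      have hb' : b ∈ u := (PySem.Set.mem_ofList u b).1 hb
      rwa [List.idxOf_append_of_mem ha', List.idxOf_append_of_mem hb']
    · have hadd : PySem.Set.add (PySem.Set.ofList u) x = PySem.Set.ofList u ++ [x] := by
        simp [PySem.Set.add, PySem.Set.contains, List.contains_eq_mem, PySem.Set.mem_ofList, hx]
      rw [hof, hadd]
      rw [List.pairwise_append]
      refine ⟨?_, by simp, ?_⟩
      · refine ih.imp_of_mem ?_
        intro a b ha hb hab
        have ha' : a ∈ u := (PySem.Set.mem_ofList u a).1 ha
        have hb' : b ∈ u := (PySem.Set.mem_ofList u b).1 hb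
        rwa [List.idxOf_append_of_mem ha', List.idxOf_append_of_mem hb']
      · intro a ha b hb
        simp at hb
        subst hb
        have ha' : a ∈ u := (PySem.Set.mem_ofList u a).1 ha
        rw [List.idxOf_append_of_mem ha', List.idxOf_append_of_notMem hx]
        have := List.idxOf_lt_length_of_mem ha'
        simp
        omega

-- hence A's sorted(set(chave), key=chave.index) is just the dedup in insertion order
theorem sorted_ofList_find (u : List Char) :
    PySem.List.sorted (PySem.Set.ofList u) (fun c => PySem.Chars.find u [c])
      = PySem.Set.ofList u := by
  apply PySem.List.sorted_eq_of_perm_of_pairwise_lt _ _ _ (List.Perm.refl _)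
  refine (ofList_pairwise_idxOf u).imp_of_mem ?_
  intro a b ha hb hab
  have ha' : a ∈ u := (PySem.Set.mem_ofList u a).1 ha
  have hb' : b ∈ u := (PySem.Set.mem_ofList u b).1 hb
  rw [find_singleton u a ha', find_singleton u b hb']
  exact_mod_cast hab

-- dropping the first m elements of a duplicate-free list = filtering out its first m elements
theorem filter_not_take (l : List Char) (m : Nat) (h : l.Nodup) :
    l.filter (fun x => !((l.take m).contains x)) = l.drop m := by
  induction l generalizing m with
  | nil => simp
  | cons a t ih =>
    cases m with
    | zero => simp
    | succ m =>
      have hna : a ∉ t := (List.nodup_cons.1 h).1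
      have hnt : t.Nodup := (List.nodup_cons.1 h).2
      simp only [List.take_succ_cons, List.drop_succ_cons, List.filter_cons]
      have h1 : (!((a :: t.take m).contains a)) = false := by
        simp
      rw [h1, if_neg (by decide)]
      rw [← ih m hnt]
      apply List.filter_congr
      intro x hx
      have hxa : x ≠ a := fun he => hna (he ▸ hx)
      simp [List.contains_eq_mem, hxa]

theorem pvVal_len (k : List Char) : 26 ≤ (pvVal k).length := by
  have hA : pvA26.length = 26 := by decide
  have hsplit := List.length_eq_length_filter_add (l := pvA26) (fun c => k.contains c)
  have hsub : (pvA26.filter (fun c => k.contains c)).length ≤ k.length := by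
    have hnd : (pvA26.filter (fun c => k.contains c)).Nodup :=
      (by decide : pvA26.Nodup).filter _
    have hss : (pvA26.filter (fun c => k.contains c)) ⊆ k := by
      intro x hx
      simpa [List.contains_eq_mem] using List.of_mem_filter hx
    exact (hnd.subperm hss).length_le
  have : (pvVal k).length = k.length + (pvA26.filter (fun c => !(k.contains c))).length := by
    simp [pvVal]
  omega

theorem zip_take_len {α β : Type} (as : List α) (bs : List β) :
    as.zip (bs.take as.length) = as.zip bs := by
  induction as generalizing bs with
  | nil => simp
  | cons a t ih =>
    cases bs with
    | nil => simp
    | cons b bt => simp [List.take_succ_cons, ih]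

-- loop invariant: after j iterations A's dict holds the first j pairs of B's zip
theorem loop_inv (k : List Char) (j : Nat) (hj : j ≤ 26) :
    (((List.range j).map (fun n : Nat => (n : Int))).foldl (pvStep k) PySem.Dict.empty).items
      = ((pvA26.take j).map pvS).zip (((pvVal k).take j).map pvS) := by
  induction j with
  | zero => simp [PySem.Dict.empty]
  | succ j ih =>
    have hjlt : j < 26 := by omega
    have hA26len : pvA26.length = 26 := by decide
    have hAnd : pvA26.Nodup := by decide
    have hV : 26 ≤ (pvVal k).length := pvVal_len k
    rw [List.range_succ, List.map_append, List.foldl_append]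
    simp only [List.map_cons, List.map_nil, List.foldl_cons, List.foldl_nil]
    set d := ((List.range j).map (fun n : Nat => (n : Int))).foldl (pvStep k) PySem.Dict.empty with hd
    have ihs := ih (by omega)

    have hlenA : (pvA26.take j).length = j := by rw [List.length_take]; omega
    have hlenV : ((pvVal k).take j).length = j := by rw [List.length_take]; omega
    have hkeys : d.keys = (pvA26.take j).map pvS := by
      rw [PySem.Dict.keys, ihs]
      exact List.map_fst_zip (by simp; omega)

    have hvals : d.values = ((pvVal k).take j).map pvS := by
      rw [PySem.Dict.values, ihs]
      exact List.map_snd_zip (by simp; omega)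
    have hjA : j < pvA26.length := by omega
    have hjV : j < (pvVal k).length := by omega
    have hgetA : PySem.List.pyGetD pvA26 (j : Int) ' ' = pvA26[j]'hjA := by
      rw [PySem.List.pyGetD_natCast]
      exact List.getD_eq_getElem _ _ hjA
    have hfresh : d.contains (pvS (pvA26[j]'hjA)) = false := by
      rw [PySem.Dict.contains_eq_decide_mem_keys, hkeys]
      simp only [List.mem_map, decide_eq_false_iff_not]
      rintro ⟨x, hx, hex⟩
      have hxe : x = pvA26[j]'hjA := pvS_inj hex
      subst hxe
      have hmem := (List.mem_take_iff_idxOf_lt (List.getElem_mem hjA)).1 hx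
      rw [hAnd.idxOf_getElem j hjA] at hmem
      omega
    have hstep : pvStep k d (j : Int)
        = d.insert (pvS (pvA26[j]'hjA)) (pvS ((pvVal k)[j]'hjV)) := by
      by_cases hcase : j < k.length
      · have hcond : ((j : Nat) : Int) < (k.length : Int) := by exact_mod_cast hcase
        unfold pvStep
        rw [if_pos hcond, hgetA]
        congr 2
        rw [PySem.List.pyGetD_natCast, List.getD_eq_getElem _ _ hcase]
        exact (List.getElem_append_left (bs := pvA26.filter (fun c => !(k.contains c))) _).symm
      · have hge : k.length ≤ j := by omega
        have hcond : ¬ (((j : Nat) : Int) < (k.length : Int)) := by exact_mod_cast not_lt.2 hge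
        unfold pvStep
        rw [if_neg hcond, hgetA]
        congr 2
        set lf := pvA26.filter (fun c => !(k.contains c)) with hlf
        set m := j - k.length with hm
        have hVlen : (pvVal k).length = k.length + lf.length := by simp [pvVal, hlf]
        have hmlt : m < lf.length := by omega
        have hlfnd : lf.Nodup := hAnd.filter _
        have htake : (pvVal k).take j = k ++ lf.take m := by
          simp only [pvVal]
          rw [List.take_append, List.take_of_length_le hge, ← hlf, ← hm]
        have hfilter : (pvA26.filter (fun letra => !(d.values.contains (pvS letra))))
            = lf.drop m := by
          have h1 : ∀ x ∈ pvA26,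
              (!(d.values.contains (pvS x)))
                = ((fun c => !((lf.take m).contains c)) x && (fun c => !(k.contains c)) x) := by
            intro x hx
            rw [hvals, contains_map_pvS, htake]
            simp [List.contains_eq_mem]
            exact Bool.and_comm _ _
          rw [List.filter_congr h1, ← List.filter_filter]
          rw [← hlf, filter_not_take lf m hlfnd]
        rw [hfilter, PySem.List.pyGetD_zero, ← List.getElem_cons_drop hmlt]
        simp only [List.getD_cons_zero]
        simp only [pvVal]
        rw [List.getElem_append_right hge]
    rw [hstep, PySem.Dict.items_insert_of_not_contains _ _ hfresh, ihs]
    rw [List.take_add_one, List.take_add_one (l := pvVal k)]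
    rw [List.getElem?_eq_getElem hjA, List.getElem?_eq_getElem hjV]
    simp only [Option.toList_some, List.map_append, List.map_cons, List.map_nil]
    rw [List.zip_append (by simp; omega)]
    simp

-- ===== VERDICT (by name: the statement is the Claim_ definition above) =====
theorem criar_tabela_substituicao_spec : Claim_equal_criar_tabela_substituicao := by
  intro chave _
  show criar_tabela_substituicao chave = criar_tabela_substituicao_alt chave
  have hA26len : pvA26.length = 26 := by decide
  have hAnd : pvA26.Nodup := by decide
  unfold criar_tabela_substituicao criar_tabela_substituicao_alt
  simp only [sorted_ofList_find, PySem.List.dedup]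
  set u : List Char := PySem.Chars.upper chave.toList with hu
  set k : List Char := PySem.Set.ofList u with hkdef
  have hV := pvVal_len k
  refine Eq.trans (b := ((pvA26.take 26).map pvS).zip (((pvVal k).take 26).map pvS)) ?_ ?_
  · show ((PySem.List.pyRange 0 (pvA26.length : Int) 1).foldl (pvStep k) PySem.Dict.empty).items = _
    rw [PySem.List.pyRange_zero_natCast, hA26len]
    exact loop_inv k 26 (le_refl _)
  · have hlen : (pvA26.map pvS).length ≤ ((pvVal k).map pvS).length := by
      simp [hA26len]; omega
    have hnd : (((pvA26.map pvS).zip ((pvVal k).map pvS)).map Prod.fst).Nodup := by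
      rw [List.map_fst_zip hlen]; exact hAnd.map pvS_inj
    have hitems : (PySem.Dict.ofList ((pvA26.map pvS).zip ((pvVal k).map pvS))).items
        = (pvA26.map pvS).zip ((pvVal k).map pvS) := by
      have h := PySem.Dict.items_foldl_insert_fresh
        (l := (pvA26.map pvS).zip ((pvVal k).map pvS))
        (k := Prod.fst) (v := Prod.snd) (d := PySem.Dict.empty) (by intro a _; simp) hnd
      simpa [PySem.Dict.ofList, PySem.Dict.update] using h
    show _ = (PySem.Dict.ofList ((pvA26.map pvS).zip ((pvVal k).map pvS))).items
    rw [hitems, List.take_of_length_le (le_of_eq hA26len), List.map_take]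
    have h26 : (26 : Nat) = (pvA26.map pvS).length := by simp [hA26len]
    rw [h26, zip_take_len]
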